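-- pv_equiv track=rewrite | github.com/Dominika6/python | zestaw11/11_1.py | prawie_posortowane
-- ===== SOURCE A (Python) =====
-- def prawie_posortowane(n):
--     L = []
--     for i in range(n):
--         if i == (n - 1) and (i % 2 == 0):
--             L.append(i)
--             return L
--         elif (i % 2) == 0:
--             L.append(i+1)
--         elif (i % 2) == 1:
--             L.append(i-1)
--     return L
-- ===== SOURCE B (Python) =====
-- def prawie_posortowane(n):
--     L = list(range(n))
--     for i in range(0, n - 1, 2):
--         L[i], L[i + 1] = L[i + 1], L[i]
--     return L
-- ===== Notes on version B (the rewrite author's own statement) =====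
-- stated objective: simpler
-- what changed: A constructs each element by per-index parity branching with a last-element special case inside the loop; B materializes list(range(n)) and swaps adjacent pairs in place with a stride-2 index loop.
import Mathlib
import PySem

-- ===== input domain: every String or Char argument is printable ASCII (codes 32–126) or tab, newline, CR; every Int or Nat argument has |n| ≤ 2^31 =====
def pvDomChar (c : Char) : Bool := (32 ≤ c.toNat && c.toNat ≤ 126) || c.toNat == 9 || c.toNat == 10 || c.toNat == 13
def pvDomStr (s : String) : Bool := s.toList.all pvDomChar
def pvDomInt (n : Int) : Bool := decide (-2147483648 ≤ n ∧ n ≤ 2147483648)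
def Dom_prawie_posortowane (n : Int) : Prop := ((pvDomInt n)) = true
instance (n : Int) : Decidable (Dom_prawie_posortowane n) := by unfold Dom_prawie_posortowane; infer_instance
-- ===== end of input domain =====

-- B builds list(range(n)) and swaps adjacent pairs in place (stride-2 loop), replacing
-- A's per-index parity branching; objective: simpler. Equivalence of return values is proved.

-- ===== PORT A =====
-- the for-loop of A with its early 'return' (taken only on the last, even index)
def pvALoop (n : Int) : List Int → List Int → List Int
  | acc, [] => acc
  | acc, i :: rest =>
    if i = n - 1 ∧ PySem.Int.mod i 2 = 0 then acc ++ [i]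
    else if PySem.Int.mod i 2 = 0 then pvALoop n (acc ++ [i + 1]) rest
    else if PySem.Int.mod i 2 = 1 then pvALoop n (acc ++ [i - 1]) rest
    else pvALoop n acc rest

def prawie_posortowane (n : Int) : List Int :=
  pvALoop n [] (PySem.List.pyRange 0 n 1)

-- ===== PORT B =====
-- L[i], L[i+1] = L[i+1], L[i]  — both reads happen before both writes; the loop
-- 'for i in range(0, n-1, 2)' only produces indices with i+1 < len(L), so the
-- total pyGetD/pySetD forms (default 0) are exact here.
def pvBStep (L : List Int) (i : Int) : List Int :=
  PySem.List.pySetD (PySem.List.pySetD L i (PySem.List.pyGetD L (i + 1) 0)) (i + 1)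
    (PySem.List.pyGetD L i 0)

def prawie_posortowane_alt (n : Int) : List Int :=
  (PySem.List.pyRange 0 (n - 1) 2).foldl pvBStep (PySem.List.pyRange 0 n 1)

-- ===== PRECONDITION & SPEC =====
def Spec_prawie_posortowane (n : Int) (out : List Int) : Prop := out = prawie_posortowane_alt n
instance (n : Int) (out : List Int) : Decidable (Spec_prawie_posortowane n out) := by unfold Spec_prawie_posortowane; infer_instance

-- ===== CLAIM (what is proved, stated in full; the proofs are below) =====
def Claim_equal_prawie_posortowane : Prop := ∀ (n : Int), Dom_prawie_posortowane n → Spec_prawie_posortowane n (prawie_posortowane n)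

-- ===== LEMMAS AND PROOFS =====

-- swapping adjacent pairs, structurally (common normal form of both ports)
def pvSwapAdj : List Int → List Int
  | a :: b :: t => b :: a :: pvSwapAdj t
  | t => t

lemma pvRange_two_nil (a b : Int) (h : b ≤ a) : PySem.List.pyRange a b 2 = [] := by
  rw [PySem.List.pyRange_of_pos a b (by norm_num)]
  simp [show ¬ a < b by omega]

lemma pvRange_two_cons (a b : Int) (h : a < b) :
    PySem.List.pyRange a b 2 = a :: PySem.List.pyRange (a + 2) b 2 := by
  rw [PySem.List.pyRange_of_pos a b (by norm_num),
      PySem.List.pyRange_of_pos (a + 2) b (by norm_num)]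
  have hm : (if a < b then ((b - a + 2 - 1) / 2).toNat else 0)
      = (if a + 2 < b then ((b - (a + 2) + 2 - 1) / 2).toNat else 0) + 1 := by
    split_ifs <;> omega
  rw [hm, List.range_succ_eq_map]
  simp only [List.map_cons, List.map_map, Nat.cast_zero, mul_zero, add_zero]
  congr 1
  apply List.map_congr_left
  intro k _
  simp only [Function.comp_apply, Nat.succ_eq_add_one]
  push_cast
  ring

lemma pvGetD_append_len (pre : List Int) (x : Int) (t : List Int) (d : Int) :
    (pre ++ x :: t).getD pre.length d = x := by
  induction pre with
  | nil => rfl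
  | cons p ps ih => simpa using ih

lemma pvSet_append_len (pre : List Int) (x : Int) (t : List Int) (v : Int) :
    (pre ++ x :: t).set pre.length v = pre ++ v :: t := by
  induction pre with
  | nil => rfl
  | cons p ps ih => simpa using ih

lemma pvBStep_mid (pre : List Int) (a b : Int) (t : List Int) :
    pvBStep (pre ++ a :: b :: t) (pre.length : Int) = pre ++ b :: a :: t := by
  have h1 : ((pre.length : Int) + 1) = ((pre.length + 1 : Nat) : Int) := by push_cast; ring
  have hb : (pre ++ a :: b :: t).getD (pre.length + 1) 0 = b := by
    have := pvGetD_append_len (pre ++ [a]) b t 0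
    simpa using this
  have hsb : (pre ++ b :: b :: t).set (pre.length + 1) a = pre ++ b :: a :: t := by
    have := pvSet_append_len (pre ++ [b]) b t a
    simpa using this
  simp only [pvBStep, h1, PySem.List.pyGetD_natCast, PySem.List.pySetD_natCast]
  rw [hb, pvGetD_append_len, pvSet_append_len, hsb]

-- A's loop over range(a, n) with a even produces the adjacent-pair swap of that range
lemma pvA_loop_swap (n : Int) (k : Nat) : ∀ (a : Int) (acc : List Int),
    a % 2 = 0 → n = a + k →
    pvALoop n acc (PySem.List.pyRange a n 1) = acc ++ pvSwapAdj (PySem.List.pyRange a n 1) := by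
  induction k using Nat.strong_induction_on with
  | _ k ih =>
    intro a acc hpar hn
    have hmod : ∀ x : Int, PySem.Int.mod x 2 = x % 2 :=
      fun x => PySem.Int.mod_eq_emod_of_pos (by norm_num)
    rcases k with _ | _ | k'
    · rw [PySem.List.pyRange_one_eq_nil (by omega)]
      simp [pvALoop, pvSwapAdj]
    · have hsing : PySem.List.pyRange a n 1 = [a] := by
        rw [show n = a + 1 by omega]; exact PySem.List.pyRange_one_singleton a
      rw [hsing]
      have hc : a = n - 1 ∧ PySem.Int.mod a 2 = 0 := ⟨by omega, by rw [hmod]; omega⟩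
      have hstep : pvALoop n acc [a] = acc ++ [a] := by
        unfold pvALoop; rw [if_pos hc]
      rw [hstep]
      simp [pvSwapAdj]
    · have h1 : PySem.List.pyRange a n 1 = a :: PySem.List.pyRange (a + 1) n 1 :=
        PySem.List.pyRange_one_cons (show a < n by omega)
      have h2 : PySem.List.pyRange (a + 1) n 1 = (a + 1) :: PySem.List.pyRange (a + 2) n 1 :=
        by rw [show (a : Int) + 2 = a + 1 + 1 by ring]
           exact PySem.List.pyRange_one_cons (show a + 1 < n by omega)
      rw [h1, h2]
      have hne : ¬ (a = n - 1 ∧ PySem.Int.mod a 2 = 0) := by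
        rintro ⟨h, _⟩; omega
      have hne2 : ¬ (a + 1 = n - 1 ∧ PySem.Int.mod (a + 1) 2 = 0) := by
        rintro ⟨_, h⟩; rw [hmod] at h; omega
      simp only [pvALoop, if_neg hne, if_pos (by rw [hmod]; omega : PySem.Int.mod a 2 = 0),
        if_neg hne2, if_neg (by rw [hmod]; omega : ¬ PySem.Int.mod (a + 1) 2 = 0),
        if_pos (by rw [hmod]; omega : PySem.Int.mod (a + 1) 2 = 1)]
      rw [ih k' (by omega) (a + 2) (acc ++ [a + 1] ++ [a + 1 - 1]) (by omega) (by omega)]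
      simp [pvSwapAdj, show a + 1 - 1 = a by ring]

-- B's stride-2 fold swaps the adjacent pairs of the suffix after any prefix
lemma pvB_fold_swap (k : Nat) : ∀ (t pre : List Int), t.length = k →
    (PySem.List.pyRange (pre.length : Int) ((pre.length : Int) + t.length - 1) 2).foldl pvBStep (pre ++ t)
      = pre ++ pvSwapAdj t := by
  induction k using Nat.strong_induction_on with
  | _ k ih =>
    intro t pre hlen
    rcases k with _ | _ | k'
    · have ht : t = [] := List.eq_nil_of_length_eq_zero hlen
      subst ht
      rw [pvRange_two_nil _ _ (by simp)]
      simp [pvSwapAdj]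
    · rcases t with _ | ⟨x, _ | ⟨y, t2⟩⟩
      · simp at hlen
      · rw [pvRange_two_nil _ _ (by simp)]
        simp [pvSwapAdj]
      · simp at hlen
    · rcases t with _ | ⟨a, _ | ⟨b, t'⟩⟩
      · simp at hlen
      · simp at hlen
      have hlen' : t'.length = k' := by simpa using hlen
      have hcons : PySem.List.pyRange (pre.length : Int) ((pre.length : Int) + (a :: b :: t').length - 1) 2
          = (pre.length : Int) :: PySem.List.pyRange ((pre.length : Int) + 2) ((pre.length : Int) + (a :: b :: t').length - 1) 2 := by
        apply pvRange_two_cons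
        simp; omega
      rw [hcons]
      simp only [List.foldl_cons, pvBStep_mid]
      have h2 := ih k' (by omega) t' (pre ++ [b, a]) hlen'
      simp only [List.length_append, List.length_cons, List.length_nil, List.append_assoc,
        List.cons_append, List.nil_append] at h2 ⊢
      push_cast at h2 ⊢
      ring_nf at h2 ⊢
      rw [h2]
      simp [pvSwapAdj]

-- ===== VERDICT (by name: the statement is the Claim_ definition above) =====
theorem prawie_posortowane_spec : Claim_equal_prawie_posortowane := by
  intro n _
  unfold Spec_prawie_posortowane prawie_posortowane prawie_posortowane_alt
  by_cases hn : n ≤ 0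
  · rw [PySem.List.pyRange_one_eq_nil (by omega), pvRange_two_nil _ _ (by omega)]
    simp [pvALoop]
  · replace hn : 0 < n := by omega
    have hk : n = (0 : Int) + (n.toNat : Int) := by omega
    rw [pvA_loop_swap n n.toNat 0 [] (by norm_num) hk]
    have hlen : (PySem.List.pyRange 0 n 1).length = n.toNat := by
      rw [PySem.List.length_pyRange_one]; congr 1; omega
    have := pvB_fold_swap n.toNat (PySem.List.pyRange 0 n 1) [] hlen
    simp only [List.nil_append, List.length_nil, Nat.cast_zero, hlen] at this
    rw [show (0 : Int) + (n.toNat : Int) - 1 = n - 1 by omega] at this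
    rw [this]
    simp
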